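-- pv_equiv track=rewrite | github.com/yonghyunk1m/PianoVAM-Code | FingeringDetection/midicomparison.py | tokentoframeinfo
-- ===== SOURCE A (Python) =====
-- def tokentoframeinfo(tokenlist, frame_count):
--     # token list until now: [Total Start Position, Pitch(0~95(가상건반은 G8까지 있음)), End position , token number]
--     framemidilist = []
--     for frame in range(frame_count):
--         keylist = []
--         for token in tokenlist:
--             if frame in range(token[0], token[2]):
--                 keylist.append([token[1], token[3]])
--         framemidilist.append(keylist)
--     return framemidilist
-- ===== SOURCE B (Python) =====
-- def tokentoframeinfo(tokenlist, frame_count):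
--     # One pass over the tokens: each token appends its [pitch, number] entry
--     # directly into every frame bucket of its clipped [start, end) range.
--     if frame_count <= 0:
--         return []
--     framemidilist = [[] for _ in range(frame_count)]
--     for token in tokenlist:
--         lo = max(token[0], 0)
--         hi = min(token[2], frame_count)
--         for frame in range(lo, hi):
--             framemidilist[frame].append([token[1], token[3]])
--     return framemidilist
-- ===== Notes on version B (the rewrite author's own statement) =====
-- stated objective: faster
-- what changed: Instead of scanning every token for every frame (frames x tokens), B allocates all frame buckets once and makes a single pass over the tokens, appending each token's entry directly into the buckets of its clipped [start,end) range.
import Mathlib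
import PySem

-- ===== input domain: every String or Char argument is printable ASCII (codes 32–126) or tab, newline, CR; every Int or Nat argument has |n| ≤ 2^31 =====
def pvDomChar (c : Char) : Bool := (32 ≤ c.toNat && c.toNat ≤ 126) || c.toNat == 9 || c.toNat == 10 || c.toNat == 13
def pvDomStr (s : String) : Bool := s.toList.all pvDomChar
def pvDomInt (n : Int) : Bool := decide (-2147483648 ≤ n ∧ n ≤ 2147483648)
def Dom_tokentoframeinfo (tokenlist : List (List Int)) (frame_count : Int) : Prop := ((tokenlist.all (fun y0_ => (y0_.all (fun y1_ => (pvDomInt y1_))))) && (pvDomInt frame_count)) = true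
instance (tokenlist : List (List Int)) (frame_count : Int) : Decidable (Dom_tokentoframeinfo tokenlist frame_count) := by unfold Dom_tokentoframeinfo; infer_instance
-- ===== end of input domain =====

-- B replaces A's frame×token double scan by one pass over the tokens that appends
-- each token's entry into the buckets of its clipped [start,end) frame range (faster in a timing run).

-- ===== PORT A =====
-- literal transliteration of A: for frame in range(frame_count): for token in tokenlist: …
-- token[k] is PySem.List.pyGetD token k 0; under Pre_ every accessed index exists, so the default is never the value used.
def tokentoframeinfo (tokenlist : List (List Int)) (frame_count : Int) : List (List (List Int)) :=
  (PySem.List.pyRange 0 frame_count 1).foldl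
    (fun framemidilist frame =>
      framemidilist ++
        [tokenlist.foldl
          (fun keylist token =>
            if PySem.List.pyGetD token 0 0 ≤ frame ∧ frame < PySem.List.pyGetD token 2 0 then
              keylist ++ [[PySem.List.pyGetD token 1 0, PySem.List.pyGetD token 3 0]]
            else keylist)
          []])
    []

-- ===== PORT B =====
-- literal transliteration of Source B: early return [] when there are no frames, else buckets built
-- once ([[ ] for _ in range(frame_count)] has frame_count.toNat elements), then one foldl over the
-- tokens; inside the inner range the index 'frame' satisfies 0 ≤ frame, so 'frame.toNat' is exactly
-- Python's framemidilist[frame].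
def tokentoframeinfo_alt (tokenlist : List (List Int)) (frame_count : Int) : List (List (List Int)) :=
  if frame_count ≤ 0 then []
  else
    tokenlist.foldl
      (fun framemidilist token =>
        (PySem.List.pyRange (max (PySem.List.pyGetD token 0 0) 0)
                            (min (PySem.List.pyGetD token 2 0) frame_count) 1).foldl
          (fun framemidilist frame =>
            framemidilist.modify frame.toNat
              (fun keylist => keylist ++ [[PySem.List.pyGetD token 1 0, PySem.List.pyGetD token 3 0]]))
          framemidilist)
      (List.replicate frame_count.toNat [])

-- ===== PRECONDITION & SPEC =====
-- Pre_ is exactly where Python A returns: for frame_count ≤ 0 A always returns [] (admitted here);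
-- for 0 < frame_count A raises IndexError iff some token has fewer than 3 entries, or exactly 3
-- entries and a nonempty clipped frame range (then token[3] is read).
def Pre_tokentoframeinfo (tokenlist : List (List Int)) (frame_count : Int) : Prop :=
  0 < frame_count →
    (∀ t ∈ tokenlist, 3 ≤ t.length) ∧
    (∀ t ∈ tokenlist,
      4 ≤ t.length ∨
        min (PySem.List.pyGetD t 2 0) frame_count ≤ max (PySem.List.pyGetD t 0 0) 0)
instance (tokenlist : List (List Int)) (frame_count : Int) : Decidable (Pre_tokentoframeinfo tokenlist frame_count) := by unfold Pre_tokentoframeinfo; infer_instance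
def pvWitness_tokentoframeinfo : List (List Int) × Int := ([[0, 60, 2, 1], [1, 61, 3, 2]], 3)
def Spec_tokentoframeinfo (tokenlist : List (List Int)) (frame_count : Int) (out : List (List (List Int))) : Prop := out = tokentoframeinfo_alt tokenlist frame_count
instance (tokenlist : List (List Int)) (frame_count : Int) (out : List (List (List Int))) : Decidable (Spec_tokentoframeinfo tokenlist frame_count out) := by unfold Spec_tokentoframeinfo; infer_instance

-- ===== CLAIM (what is proved, stated in full; the proofs are below) =====
def Claim_equal_tokentoframeinfo : Prop := ∀ (tokenlist : List (List Int)) (frame_count : Int), Dom_tokentoframeinfo tokenlist frame_count → Pre_tokentoframeinfo tokenlist frame_count → Spec_tokentoframeinfo tokenlist frame_count (tokentoframeinfo tokenlist frame_count)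

-- ===== LEMMAS AND PROOFS =====

-- the entry a token contributes
def pvItem (t : List Int) : List Int :=
  [PySem.List.pyGetD t 1 0, PySem.List.pyGetD t 3 0]

-- one token's inner range-fold of B, pointwise
theorem pv_inner_getElem? (u : List (List Int) → List (List Int)) (lo hi : Int) (hlo : 0 ≤ lo) :
    ∀ (frames : List (List (List Int))) (i : Nat),
      ((PySem.List.pyRange lo hi 1).foldl (fun fr f => fr.modify f.toNat u) frames)[i]? =
        if lo ≤ (i : Int) ∧ (i : Int) < hi then u <$> frames[i]? else frames[i]? := by
  by_cases h : hi ≤ lo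
  · intro frames i
    rw [PySem.List.pyRange_one_eq_nil h]
    simp only [List.foldl_nil]
    rw [if_neg]; omega
  · have h' : lo < hi := by omega
    have hm : (hi - (lo + 1)).toNat < (hi - lo).toNat := by omega
    intro frames i
    rw [PySem.List.pyRange_one_cons h']
    simp only [List.foldl_cons]
    rw [pv_inner_getElem? u (lo + 1) hi (by omega)]
    rw [List.getElem?_modify]
    rcases Option.eq_none_or_eq_some frames[i]? with hf | ⟨b, hf⟩ <;> rw [hf] <;>
      simp only [Option.map_eq_map, Option.map_none, Option.map_some] <;>
      split_ifs <;> simp_all <;> omega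
  termination_by (hi - lo).toNat

-- B's outer token-fold, pointwise: each bucket accumulates the filtered contributions
theorem pv_outer_getElem? (frame_count : Int) :
    ∀ (ts : List (List Int)) (frames : List (List (List Int))) (i : Nat),
      (ts.foldl
        (fun framemidilist token =>
          (PySem.List.pyRange (max (PySem.List.pyGetD token 0 0) 0)
                              (min (PySem.List.pyGetD token 2 0) frame_count) 1).foldl
            (fun fr frame => fr.modify frame.toNat (fun k => k ++ [pvItem token]))
            framemidilist)
        frames)[i]? =
      (fun b => b ++
        (ts.filter (fun t => decide (PySem.List.pyGetD t 0 0 ≤ (i : Int) ∧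
          (i : Int) < PySem.List.pyGetD t 2 0 ∧ (i : Int) < frame_count))).map pvItem) <$>
        frames[i]? := by
  intro ts
  induction ts with
  | nil => intro frames i; simp
  | cons t ts ih =>
    intro frames i
    simp only [List.foldl_cons]
    rw [ih]
    rw [pv_inner_getElem? _ _ _ (by omega)]
    by_cases hc : PySem.List.pyGetD t 0 0 ≤ (i : Int) ∧
        (i : Int) < PySem.List.pyGetD t 2 0 ∧ (i : Int) < frame_count
    · rw [if_pos (by omega)]
      rcases Option.eq_none_or_eq_some frames[i]? with hf | ⟨b, hf⟩ <;> rw [hf] <;>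
        simp [hc]
    · rw [if_neg (by omega)]
      rcases Option.eq_none_or_eq_some frames[i]? with hf | ⟨b, hf⟩ <;> rw [hf] <;>
        simp [hc]

theorem tokentoframeinfo_eq_map (tokenlist : List (List Int)) (frame_count : Int) :
    tokentoframeinfo tokenlist frame_count =
      (PySem.List.pyRange 0 frame_count 1).map (fun frame =>
        (tokenlist.filter (fun t => decide (PySem.List.pyGetD t 0 0 ≤ frame ∧
          frame < PySem.List.pyGetD t 2 0))).map pvItem) := by
  unfold tokentoframeinfo
  rw [PySem.List.foldl_append_singleton_eq_map]
  simp only [List.nil_append]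
  congr 1
  funext frame
  unfold pvItem
  rw [PySem.List.foldl_append_ite
    (fun t => PySem.List.pyGetD t 0 0 ≤ frame ∧ frame < PySem.List.pyGetD t 2 0)
    (fun t => [PySem.List.pyGetD t 1 0, PySem.List.pyGetD t 3 0])]
  simp

-- ===== VERDICT (by name: the statement is the Claim_ definition above) =====
theorem tokentoframeinfo_spec : Claim_equal_tokentoframeinfo := by
  intro tokenlist frame_count _ _
  unfold Spec_tokentoframeinfo
  rw [tokentoframeinfo_eq_map]
  unfold tokentoframeinfo_alt
  by_cases hfc : frame_count ≤ 0
  · rw [if_pos hfc, PySem.List.pyRange_one_eq_nil hfc]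
    simp
  · rw [if_neg hfc]
    apply List.ext_getElem?
    intro i
    have hB := pv_outer_getElem? frame_count tokenlist (List.replicate frame_count.toNat []) i
    unfold pvItem at hB
    rw [hB, List.getElem?_replicate]
    by_cases hi : i < frame_count.toNat
    · have hfc' : frame_count = ((frame_count.toNat : Nat) : Int) := by omega
      conv_lhs => rw [hfc']
      rw [PySem.List.getElem?_map_pyRange_zero _ frame_count.toNat i hi, if_pos hi]
      simp only [Option.map_eq_map, Option.map_some, Option.some.injEq, List.nil_append]
      unfold pvItem
      congr 1
      apply List.filter_congr
      intro t _
      have hilt : (i : Int) < frame_count := by omega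
      simp [hilt]
    · rw [if_neg hi]
      simp only [Option.map_eq_map, Option.map_none]
      rw [List.getElem?_eq_none]
      simp only [List.length_map, PySem.List.length_pyRange_one]
      omega
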